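-- pv_equiv track=rewrite | github.com/William19D/NexVest | Nexvest-Back-FASTAPI/etl/limpieza/deteccion.py | detectar_fechas_duplicadas
-- ===== SOURCE A (Python) =====
-- def detectar_fechas_duplicadas(serie):
--     """
--     Devuelve los indices de filas cuya fecha aparece mas de una vez.
--
--     Se conserva la primera aparicion y se marcan las repetidas para que el
--     modulo de correccion las elimine. Esto evita falsos retornos cero o
--     saltos artificiales producidos por filas duplicadas en el origen.
--
--     Complejidad: O(n).
--     """
--     vistas = set()
--     duplicados = []
--     indice = 0
--     while indice < len(serie):
--         fecha = serie[indice].get("fecha")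
--         if fecha in vistas:
--             duplicados.append(indice)
--         else:
--             vistas.add(fecha)
--         indice = indice + 1
--     return duplicados
-- ===== SOURCE B (Python) =====
-- def detectar_fechas_duplicadas(serie):
--     """Grouping re-implementation: bucket the row indices by fecha, keep every
--     bucket's indices after the first occurrence, and return them sorted."""
--     pares = [(fila.get("fecha"), indice) for indice, fila in enumerate(serie)]
--     posiciones = {}
--     for fecha, indice in pares:
--         posiciones.setdefault(fecha, []).append(indice)
--     duplicados = []
--     for indices in posiciones.values():
--         duplicados.extend(indices[1:])
--     return sorted(duplicados)
-- ===== Notes on version B (the rewrite author's own statement) =====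
-- stated objective: alternative
-- what changed: Replaces A's single streaming pass with a seen-set by a staged grouping algorithm: bucket all row indices by fecha in a dict, flatten each bucket's indices after the first, and sort the result.
import Mathlib
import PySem

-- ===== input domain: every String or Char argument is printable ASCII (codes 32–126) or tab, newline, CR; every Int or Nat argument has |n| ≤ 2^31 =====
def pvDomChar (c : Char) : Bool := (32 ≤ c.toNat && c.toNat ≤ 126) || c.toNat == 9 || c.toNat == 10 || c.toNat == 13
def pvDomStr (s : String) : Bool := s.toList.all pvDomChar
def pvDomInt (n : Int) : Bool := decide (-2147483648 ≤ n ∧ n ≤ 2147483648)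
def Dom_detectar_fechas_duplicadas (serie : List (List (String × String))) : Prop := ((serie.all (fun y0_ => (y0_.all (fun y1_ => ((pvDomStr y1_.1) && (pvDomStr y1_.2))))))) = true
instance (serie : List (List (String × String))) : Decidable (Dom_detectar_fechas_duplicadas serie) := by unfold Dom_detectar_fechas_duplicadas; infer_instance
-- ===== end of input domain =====

-- B groups row indices by fecha in a dict, flattens each bucket's non-first indices and sorts — a staged grouping pass instead of A's streaming seen-set scan (alternative, not faster).


-- ===== PORT A =====
-- while-loop over indice = 0,1,…,len-1 with state (vistas, duplicados); serie[indice]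
-- is always in range, so pyGetD is exact here.
def detectar_fechas_duplicadas (serie : List (List (String × String))) : List Int :=
  let r := (PySem.List.pyRange 0 (PySem.List.len serie) 1).foldl
    (fun (st : PySem.Set (Option String) × List Int) indice =>
      let fecha := (PySem.Dict.mk (PySem.List.pyGetD serie indice [])).get? "fecha"
      if PySem.Set.contains st.1 fecha then (st.1, st.2 ++ [indice])
      else (PySem.Set.add st.1 fecha, st.2))
    (PySem.Set.empty, [])
  r.2

-- ===== PORT B =====
-- pares = [(fila.get("fecha"), indice) …]; posiciones.setdefault(fecha, []).append(indice)
-- is Dict.modify fecha [] (· ++ [indice]); extend(indices[1:]) appends the slice; sorted at the end.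
def detectar_fechas_duplicadas_alt (serie : List (List (String × String))) : List Int :=
  let pares := (PySem.List.enumerate serie 0).map
    (fun p => ((PySem.Dict.mk p.2).get? "fecha", p.1))
  let posiciones := pares.foldl
    (fun (d : PySem.Dict (Option String) (List Int)) p => d.modify p.1 [] (· ++ [p.2]))
    PySem.Dict.empty
  let duplicados := posiciones.values.foldl
    (fun acc indices => acc ++ PySem.List.slice indices (some 1) none) []
  PySem.List.sorted duplicados (fun x => x) false

-- ===== PRECONDITION & SPEC =====
def Spec_detectar_fechas_duplicadas (serie : List (List (String × String))) (out : List Int) : Prop := out = detectar_fechas_duplicadas_alt serie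
instance (serie : List (List (String × String))) (out : List Int) : Decidable (Spec_detectar_fechas_duplicadas serie out) := by unfold Spec_detectar_fechas_duplicadas; infer_instance

-- ===== CLAIM (what is proved, stated in full; the proofs are below) =====
def Claim_equal_detectar_fechas_duplicadas : Prop := ∀ (serie : List (List (String × String))), Dom_detectar_fechas_duplicadas serie → Spec_detectar_fechas_duplicadas serie (detectar_fechas_duplicadas serie)

-- ===== LEMMAS AND PROOFS =====

-- the shared list of fechas
def pvFechas (serie : List (List (String × String))) : List (Option String) :=
  serie.map (fun fila => (PySem.Dict.mk fila).get? "fecha")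

-- indices (in increasing order) at which f occurs in F
def pvOcc (F : List (Option String)) (f : Option String) : List Int :=
  ((PySem.List.enumerate F 0).filter (fun p => p.2 == f)).map (·.1)

-- B's multiset of duplicates: per distinct fecha, all occurrence indices but the first
def pvM (F : List (Option String)) : List Int :=
  (PySem.Set.ofList F).flatMap (fun f => (pvOcc F f).tail)

-- A's list of duplicates: indices whose fecha already occurred strictly before
def pvL (F : List (Option String)) : List Int :=
  (PySem.List.pyRange 0 F.length 1).filter
    (fun i => (PySem.List.slice F none (some i)).contains (PySem.List.pyGetD F i none))

lemma pvFecha_get (serie : List (List (String × String))) (k : Nat) :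
    (PySem.Dict.mk (PySem.List.pyGetD serie (k : Int) [])).get? "fecha"
      = PySem.List.pyGetD (pvFechas serie) (k : Int) none := by
  simp [pvFechas]; cases serie[k]? <;> rfl

-- invariant of A's loop after k steps
lemma pvInvariant (serie : List (List (String × String))) (k : Nat) (hk : k ≤ serie.length) :
    ((PySem.List.pyRange 0 (k : Int) 1).foldl
      (fun (st : PySem.Set (Option String) × List Int) indice =>
        let fecha := (PySem.Dict.mk (PySem.List.pyGetD serie indice [])).get? "fecha"
        if PySem.Set.contains st.1 fecha then (st.1, st.2 ++ [indice])
        else (PySem.Set.add st.1 fecha, st.2))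
      (PySem.Set.empty, []))
    = (PySem.Set.ofList ((pvFechas serie).take k),
       (PySem.List.pyRange 0 (k : Int) 1).filter
         (fun i => (PySem.List.slice (pvFechas serie) none (some i)).contains
            (PySem.List.pyGetD (pvFechas serie) i none))) := by
  induction k with
  | zero => simp [PySem.List.pyRange_one_eq_nil]
  | succ k ih =>
    have hklt : k < (pvFechas serie).length := by simp [pvFechas]; omega
    have hcast : ((k+1 : Nat) : Int) = (k : Int) + 1 := by push_cast; ring
    rw [hcast, PySem.List.pyRange_one_succ_right (by positivity)]
    rw [List.foldl_append, List.filter_append, ih (by omega)]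
    simp only [List.foldl_cons, List.foldl_nil, List.filter_cons, List.filter_nil,
      pvFecha_get, PySem.List.slice_to_natCast]
    rw [PySem.List.pyGetD_natCast, List.getD_eq_getElem _ _ hklt]
    rw [List.take_add_one, List.getElem?_eq_getElem hklt]
    simp only [Option.toList_some, PySem.Set.ofList_append_singleton]
    by_cases hmem : (pvFechas serie)[k] ∈ (pvFechas serie).take k
    · simp [PySem.Set.mem_ofList, PySem.Set.add, hmem]
    · simp [PySem.Set.mem_ofList, hmem]

-- A computes pvL
lemma pvA_eq (serie : List (List (String × String))) :
    detectar_fechas_duplicadas serie = pvL (pvFechas serie) := by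
  unfold detectar_fechas_duplicadas pvL
  have h := pvInvariant serie serie.length le_rfl
  simp only [pvFechas] at h ⊢
  simp only [PySem.List.len_eq, List.length_map]
  rw [show ((serie.length : Int)) = ((serie.length : Nat) : Int) from rfl]
  rw [h]

-- pairs (fecha, indice) computed from enumerate(serie) are enumerate(fechas) swapped
lemma pvPares (serie : List (List (String × String))) (s : Int) :
    (PySem.List.enumerate serie s).map (fun p => ((PySem.Dict.mk p.2).get? "fecha", p.1))
      = (PySem.List.enumerate (pvFechas serie) s).map (fun p => (p.2, p.1)) := by
  induction serie generalizing s with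
  | nil => simp [pvFechas, PySem.List.enumerate_nil]
  | cons a t ih => simp [pvFechas, PySem.List.enumerate_cons, ih]

-- B computes sorted (pvM)
lemma pvB_eq (serie : List (List (String × String))) :
    detectar_fechas_duplicadas_alt serie
      = PySem.List.sorted (pvM (pvFechas serie)) (fun x => x) false := by
  simp only [detectar_fechas_duplicadas_alt]
  rw [pvPares]
  congr 1
  have hkeys : ((((PySem.List.enumerate (pvFechas serie) 0).map (fun p => (p.2, p.1))).foldl
      (fun (d : PySem.Dict (Option String) (List Int)) p => d.modify p.1 [] (· ++ [p.2]))
      PySem.Dict.empty)).keys = PySem.Set.ofList (pvFechas serie) := by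
    rw [PySem.Dict.keys_foldl_modify_key]
    simp [PySem.Dict.keys_empty, PySem.Set.update_nil_left, List.map_map,
      Function.comp_def, PySem.List.map_snd_enumerate]
  have hnd : ((((PySem.List.enumerate (pvFechas serie) 0).map (fun p => (p.2, p.1))).foldl
      (fun (d : PySem.Dict (Option String) (List Int)) p => d.modify p.1 [] (· ++ [p.2]))
      PySem.Dict.empty)).keys.Nodup := by
    rw [hkeys]; exact PySem.Set.nodup_ofList _
  have hgetD : ∀ c, ((((PySem.List.enumerate (pvFechas serie) 0).map (fun p => (p.2, p.1))).foldl
      (fun (d : PySem.Dict (Option String) (List Int)) p => d.modify p.1 [] (· ++ [p.2]))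
      PySem.Dict.empty)).getD c [] = pvOcc (pvFechas serie) c := by
    intro c
    rw [PySem.Dict.getD_foldl_modify_append]
    simp [PySem.Dict.getD_empty, pvOcc, List.filter_map, List.map_map, Function.comp_def]
  have hvals : ((((PySem.List.enumerate (pvFechas serie) 0).map (fun p => (p.2, p.1))).foldl
      (fun (d : PySem.Dict (Option String) (List Int)) p => d.modify p.1 [] (· ++ [p.2]))
      PySem.Dict.empty)).values
      = (PySem.Set.ofList (pvFechas serie)).map (fun k => pvOcc (pvFechas serie) k) := by
    rw [PySem.Dict.values_eq_map_keys _ hnd ([] : List Int), hkeys]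
    exact List.map_congr_left (fun k _ => hgetD k)
  rw [hvals]
  simp only [PySem.List.slice_from_one]
  rw [PySem.List.foldl_append_eq_flatMap]
  simp [pvM, List.flatMap_map]

-- occurrence list over a snoc
lemma pvOcc_append (F : List (Option String)) (f g : Option String) :
    pvOcc (F ++ [f]) g = pvOcc F g ++ (if f = g then [(F.length : Int)] else []) := by
  unfold pvOcc
  rw [PySem.List.enumerate_append]
  simp only [List.filter_append, List.map_append, List.append_cancel_left_eq]
  simp [PySem.List.enumerate_cons, PySem.List.enumerate_nil, List.filter_cons]
  split_ifs with h <;> simp_all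

-- f does not occur: empty occurrence list
lemma pvOcc_nil_of_not_mem (F : List (Option String)) (g : Option String) (h : g ∉ F) :
    pvOcc F g = [] := by
  unfold pvOcc
  rw [List.map_eq_nil_iff, List.filter_eq_nil_iff]
  intro p hp
  rcases (PySem.List.mem_enumerate_iff _ _ _).1 hp with ⟨k, hk, rfl⟩
  simp only [beq_iff_eq]
  intro e
  exact absurd (e ▸ List.getElem_mem hk) h

-- f occurs: nonempty occurrence list
lemma pvOcc_ne_nil_of_mem (F : List (Option String)) (g : Option String) (h : g ∈ F) :
    pvOcc F g ≠ [] := by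
  unfold pvOcc
  rcases List.mem_iff_getElem.1 h with ⟨k, hk, he⟩
  have : ((0 + (k : Int)), F[k]) ∈ PySem.List.enumerate F 0 :=
    (PySem.List.mem_enumerate_iff _ _ _).2 ⟨k, hk, rfl⟩
  intro hnil
  rw [List.map_eq_nil_iff, List.filter_eq_nil_iff] at hnil
  exact hnil _ this (by simp [he])

-- A's list over a snoc
lemma pvL_append (F : List (Option String)) (f : Option String) :
    pvL (F ++ [f]) = pvL F ++ (if f ∈ F then [(F.length : Int)] else []) := by
  unfold pvL
  have hlen : (((F ++ [f]).length : Nat) : Int) = ((F.length : Nat) : Int) + 1 := by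
    simp
  rw [hlen, PySem.List.pyRange_one_succ_right (by positivity), List.filter_append]
  congr 1
  · apply List.filter_congr
    intro i hi
    rcases PySem.List.mem_pyRange_one.1 hi with ⟨h0, hlt⟩
    have hk : i = ((i.toNat : Nat) : Int) := by omega
    rw [hk]
    have hkle : i.toNat ≤ F.length := by omega
    rw [PySem.List.slice_to_natCast, PySem.List.slice_to_natCast,
      List.take_append_of_le_length hkle,
      PySem.List.pyGetD_natCast, PySem.List.pyGetD_natCast]
    congr 1
    rw [List.getD_eq_getElem?_getD, List.getD_eq_getElem?_getD,
      List.getElem?_append_left (by omega)]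
  · simp only [List.filter_cons, List.filter_nil,
      PySem.List.slice_to_natCast, PySem.List.pyGetD_natCast]
    rw [List.take_left, List.getD_eq_getElem _ _ (by simp),
      List.getElem_append_right (by omega)]
    simp

-- B's multiset over a snoc, up to permutation
lemma pvM_append (F : List (Option String)) (f : Option String) :
    (pvM (F ++ [f])).Perm (pvM F ++ (if f ∈ F then [(F.length : Int)] else [])) := by
  unfold pvM
  rw [PySem.Set.ofList_append_singleton]
  by_cases hf : f ∈ F
  · rw [PySem.Set.add_of_mem ((PySem.Set.mem_ofList _ _).2 hf), if_pos hf]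
    have hmem : f ∈ PySem.Set.ofList F := (PySem.Set.mem_ofList _ _).2 hf
    rcases List.append_of_mem hmem with ⟨P, Q, hPQ⟩
    have hnd : (PySem.Set.ofList F).Nodup := PySem.Set.nodup_ofList F
    rw [hPQ] at hnd
    rw [List.nodup_append] at hnd
    have hfP : f ∉ P := fun hp => hnd.2.2 f hp f (List.mem_cons_self ..) rfl
    have hfQ : f ∉ Q := (List.nodup_cons.1 hnd.2.1).1
    rw [hPQ, List.flatMap_append, List.flatMap_append, List.flatMap_cons, List.flatMap_cons]
    have hP : P.flatMap (fun g => (pvOcc (F ++ [f]) g).tail)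
        = P.flatMap (fun g => (pvOcc F g).tail) := by
      apply List.flatMap_congr
      intro g hg
      rw [pvOcc_append, if_neg (by rintro rfl; exact hfP hg), List.append_nil]
    have hQ : Q.flatMap (fun g => (pvOcc (F ++ [f]) g).tail)
        = Q.flatMap (fun g => (pvOcc F g).tail) := by
      apply List.flatMap_congr
      intro g hg
      rw [pvOcc_append, if_neg (by rintro rfl; exact hfQ hg), List.append_nil]
    have hmid : (pvOcc (F ++ [f]) f).tail
        = (pvOcc F f).tail ++ [(F.length : Int)] := by
      rw [pvOcc_append, if_pos rfl]
      cases hocc : pvOcc F f with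
      | nil => exact absurd hocc (pvOcc_ne_nil_of_mem F f hf)
      | cons a t => simp
    rw [hP, hQ, hmid]
    have hstep : (((pvOcc F f).tail ++ [(F.length : Int)])
          ++ Q.flatMap (fun g => (pvOcc F g).tail)).Perm
        (((pvOcc F f).tail ++ Q.flatMap (fun g => (pvOcc F g).tail))
          ++ [(F.length : Int)]) := by
      have h0 := (List.perm_append_comm
        (l₁ := [(F.length : Int)]) (l₂ := Q.flatMap (fun g => (pvOcc F g).tail))).append_left
        (pvOcc F f).tail
      simpa [List.append_assoc] using h0
    have h1 := hstep.append_left (P.flatMap (fun g => (pvOcc F g).tail))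
    simpa [List.append_assoc] using h1
  · rw [PySem.Set.add_of_not_mem (fun hm => hf ((PySem.Set.mem_ofList _ _).1 hm)), if_neg hf]
    rw [List.flatMap_append, List.flatMap_singleton]
    have hmid : (pvOcc (F ++ [f]) f).tail = [] := by
      rw [pvOcc_append, if_pos rfl, pvOcc_nil_of_not_mem F f hf]
      simp
    have hrest : (PySem.Set.ofList F).flatMap (fun g => (pvOcc (F ++ [f]) g).tail)
        = (PySem.Set.ofList F).flatMap (fun g => (pvOcc F g).tail) := by
      apply List.flatMap_congr
      intro g hg
      have : g ≠ f := fun e => hf (e ▸ (PySem.Set.mem_ofList _ _).1 hg)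
      rw [pvOcc_append, if_neg (fun e => this e.symm), List.append_nil]
    rw [hmid, hrest]

lemma pvL_perm_pvM (F : List (Option String)) : (pvL F).Perm (pvM F) := by
  induction F using List.reverseRecOn with
  | nil => simp [pvL, pvM, PySem.List.pyRange_one_eq_nil]
  | append_singleton F f ih =>
    rw [pvL_append]
    exact ((ih.append_right _).trans (pvM_append F f).symm)

lemma pvL_pairwise (F : List (Option String)) : (pvL F).Pairwise (· < ·) := by
  exact (PySem.List.pairwise_lt_pyRange_one 0 F.length).filter _

-- ===== VERDICT (by name: the statement is the Claim_ definition above) =====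
theorem detectar_fechas_duplicadas_spec : Claim_equal_detectar_fechas_duplicadas := by
  intro serie _
  unfold Spec_detectar_fechas_duplicadas
  rw [pvA_eq, pvB_eq]
  exact (PySem.List.sorted_eq_of_perm_of_pairwise_lt _ _ (fun x => x)
      (pvL_perm_pvM (pvFechas serie)) (pvL_pairwise (pvFechas serie))).symm
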